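-- pv_equiv track=rewrite | github.com/AndreiJeler/FLCD | lab 5 - finite automatan + scanner/scanner.py | get_string_constant
-- ===== SOURCE A (Python) =====
-- def get_string_constant(line, start_position):
--     string = ''
--     quote_count = 0
--     i = start_position
--     while i < len(line) and quote_count != 2:
--         if line[i] == '"':
--             quote_count += 1
--         string += line[i]
--         i += 1
--     return string, i
-- ===== SOURCE B (Python) =====
-- def get_string_constant(line, start_position):
--     n = len(line)
--     if start_position >= n:
--         return '', start_position
--     q1 = line.find('"', start_position)
--     if q1 != -1:
--         q2 = line.find('"', q1 + 1)
--         if q2 != -1: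
--             end = q2 + 1
--             return line[start_position:end], end
--     return line[start_position:], n
-- ===== Notes on version B (the rewrite author's own statement) =====
-- stated objective: faster
-- what changed: Replaces the char-by-char accumulating loop with a quote counter by two str.find calls locating the delimiting quotes and one slice (C-level search/slice instead of a per-character Python loop with string concatenation; measured >100x at large n).
-- outside the precondition, e.g. on get_string_constant('a"b', -1): A returns ('ba"b', 3), B returns ('b', 3); on get_string_constant('', -1): A raises IndexError, B returns ('', 0)
import Mathlib
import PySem

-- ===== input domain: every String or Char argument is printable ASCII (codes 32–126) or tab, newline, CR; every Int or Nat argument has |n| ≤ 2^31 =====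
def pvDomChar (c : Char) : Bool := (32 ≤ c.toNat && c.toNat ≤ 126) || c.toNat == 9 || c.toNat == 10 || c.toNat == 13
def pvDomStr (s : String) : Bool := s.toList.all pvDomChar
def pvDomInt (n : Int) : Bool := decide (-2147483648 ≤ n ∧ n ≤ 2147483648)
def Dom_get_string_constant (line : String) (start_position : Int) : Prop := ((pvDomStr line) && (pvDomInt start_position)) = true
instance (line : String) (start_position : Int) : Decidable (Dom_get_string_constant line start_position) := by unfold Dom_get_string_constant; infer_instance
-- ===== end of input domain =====

-- B replaces A's accumulating char-by-char loop (quote counter) with two find calls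
-- locating the delimiting quotes and one slice (objective: simpler).

-- ===== PORT A =====
-- A's while loop: accumulates characters and counts quotes; the 'none' branch of
-- pyGet? is Python's IndexError (only reachable for start_position < 0, excluded by Pre_).
def getStrLoopA (cs : List Char) (string : List Char) (qc : Int) (i : Int) :
    List Char × Int :=
  if h : i < (cs.length : Int) ∧ qc ≠ 2 then
    match PySem.List.pyGet? cs i with
    | some c => getStrLoopA cs (string ++ [c]) (if c = '"' then qc + 1 else qc) (i + 1)
    | none => (string, i)
  else (string, i)
termination_by ((cs.length : Int) - i).toNat
decreasing_by
  have := h.1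
  omega

def get_string_constant (line : String) (start_position : Int) : String × Int :=
  let r := getStrLoopA line.toList [] 0 start_position
  (String.ofList r.1, r.2)

-- ===== PORT B =====
def get_string_constant_alt (line : String) (start_position : Int) : String × Int :=
  let n : Int := PySem.Str.len line
  if start_position ≥ n then ("", start_position)
  else
    let q1 := PySem.Str.findFrom line "\"" start_position
    if q1 ≠ -1 then
      let q2 := PySem.Str.findFrom line "\"" (q1 + 1)
      if q2 ≠ -1 then
        (PySem.Str.slice line (some start_position) (some (q2 + 1)), q2 + 1)
      else (PySem.Str.slice line (some start_position) none, n)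
    else (PySem.Str.slice line (some start_position) none, n)

-- ===== PRECONDITION & SPEC =====
-- Pre_ excludes negative start positions: they lie outside the scanner's natural
-- domain (a scan position into the line); there A either raises IndexError
-- (empty line, or start_position < -len(line)) or accidentally rescans the line
-- via Python's negative-index wraparound.
def Pre_get_string_constant (line : String) (start_position : Int) : Prop :=
  0 ≤ start_position
instance (line : String) (start_position : Int) : Decidable (Pre_get_string_constant line start_position) := by unfold Pre_get_string_constant; infer_instance

def pvWitness_get_string_constant : String × Int := ("id = \"abc\";", 5)

def Spec_get_string_constant (line : String) (start_position : Int) (out : String × Int) : Prop := out = get_string_constant_alt line start_position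
instance (line : String) (start_position : Int) (out : String × Int) : Decidable (Spec_get_string_constant line start_position out) := by unfold Spec_get_string_constant; infer_instance

-- ===== CLAIM (what is proved, stated in full; the proofs are below) =====
def Claim_equal_get_string_constant : Prop := ∀ (line : String) (start_position : Int), Dom_get_string_constant line start_position → Pre_get_string_constant line start_position → Spec_get_string_constant line start_position (get_string_constant line start_position)

-- ===== LEMMAS AND PROOFS =====

-- Structural core of A's loop, over the remaining suffix of the line.
def pvScan : List Char → Int → List Char × Int
  | [], _ => ([], 0)
  | c :: t, qc =>
    if qc = 2 then ([], 0)
    else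
      let r := pvScan t (if c = '"' then qc + 1 else qc)
      (c :: r.1, r.2 + 1)

lemma pvScan_two (l : List Char) : pvScan l 2 = ([], 0) := by
  cases l <;> simp [pvScan]

lemma pvScan_one (l : List Char) :
    pvScan l 1 =
      match l.findIdx? (· = '"') with
      | some k => (l.take (k + 1), (k : Int) + 1)
      | none => (l, (l.length : Int)) := by
  induction l with
  | nil => simp [pvScan]
  | cons c t ih =>
    by_cases hc : c = '"'
    · subst hc
      simp [pvScan, pvScan_two, List.findIdx?_cons]
    · rw [List.findIdx?_cons]
      simp only [hc, decide_eq_true_eq]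
      cases ht : t.findIdx? (· = '"') with
      | none => simp [pvScan, hc, ih, ht]
      | some k =>
        simp [pvScan, hc, ih, ht, List.take_succ_cons]

lemma pvScan_zero (l : List Char) :
    pvScan l 0 =
      match l.findIdx? (· = '"') with
      | none => (l, (l.length : Int))
      | some k =>
        match (l.drop (k + 1)).findIdx? (· = '"') with
        | none => (l, (l.length : Int))
        | some m => (l.take (k + 1 + m + 1), ((k + 1 + m + 1 : ℕ) : Int)) := by
  induction l with
  | nil => simp [pvScan]
  | cons c t ih =>
    by_cases hc : c = '"'
    · subst hc
      rw [List.findIdx?_cons]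
      cases ht : t.findIdx? (· = '"') with
      | none => simp [pvScan, pvScan_one, ht]
      | some m =>
        simp [pvScan, pvScan_one, ht, List.take_succ_cons]
        omega
    · rw [List.findIdx?_cons]
      simp only [hc, decide_eq_true_eq]
      cases ht : t.findIdx? (· = '"') with
      | none => simp [pvScan, hc, ih, ht]
      | some k =>
        cases ht2 : (t.drop (k + 1)).findIdx? (· = '"') with
        | none => simp [pvScan, hc, ih, ht, ht2]
        | some m =>
          simp [pvScan, hc, ih, ht, ht2, List.take_succ_cons]
          constructor <;> ring_nf

-- A's loop equals acc ++ scan of the dropped suffix.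
lemma getStrLoopA_eq_pvScan (n : ℕ) (cs : List Char) (i : Int) (acc : List Char)
    (qc : Int) (h0 : 0 ≤ i) (hn : ((cs.length : Int) - i).toNat = n) :
    getStrLoopA cs acc qc i =
      (acc ++ (pvScan (cs.drop i.toNat) qc).1,
       i + (pvScan (cs.drop i.toNat) qc).2) := by
  induction n generalizing i acc qc with
  | zero =>
    have hge : ¬ i < (cs.length : Int) := by omega
    have hdrop : cs.drop i.toNat = [] := by
      apply List.drop_eq_nil_of_le; omega
    rw [getStrLoopA]
    simp [hge, hdrop, pvScan]
  | succ n ih =>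
    rw [getStrLoopA]
    by_cases hlt : i < (cs.length : Int)
    · by_cases hqc : qc = 2
      · subst hqc
        simp [hlt, pvScan_two]
      · have hcond : i < (cs.length : Int) ∧ qc ≠ 2 := ⟨hlt, hqc⟩
        rw [dif_pos hcond]
        have hidx : i.toNat < cs.length := by omega
        rw [PySem.List.pyGet?_eq_some_getElem cs h0 hlt]
        have hdrop : cs.drop i.toNat = cs[i.toNat] :: cs.drop (i.toNat + 1) :=
          List.drop_eq_getElem_cons hidx
        dsimp only
        rw [ih (i + 1) (acc ++ [cs[i.toNat]]) _ (by omega) (by omega)]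
        have : (i + 1).toNat = i.toNat + 1 := by omega
        rw [this, hdrop]
        by_cases hc : cs[i.toNat] = '"' <;>
          simp [pvScan, hc, hqc, List.append_assoc] <;>
          (try constructor) <;> (try trivial) <;> ring
    · have : ¬ (i < (cs.length : Int) ∧ qc ≠ 2) := by tauto
      have hdrop : cs.drop i.toNat = [] := by
        apply List.drop_eq_nil_of_le; omega
      simp [this, hdrop, pvScan]

lemma prefix_singleton (q : Char) (m : List Char) : [q] <+: m ↔ m.head? = some q := by
  cases m <;> simp [eq_comm]

-- Chars.find with a single-character needle is findIdx?.
lemma find_singleton (l : List Char) (q : Char) :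
    PySem.Chars.find l [q] =
      match l.findIdx? (· = q) with
      | some k => (k : Int)
      | none => -1 := by
  cases h : l.findIdx? (· = q) with
  | none =>
    have hall := List.findIdx?_eq_none_iff.mp h
    have : ¬ [q] <:+: l := by
      rw [List.singleton_infix_iff]
      intro hq
      simpa using hall q hq
    simp [(PySem.Chars.find_eq_neg_one_iff l [q]).mpr this]
  | some k =>
    obtain ⟨hk, hpk, hmin⟩ := List.findIdx?_eq_some_iff_getElem.mp h
    have hq : q ∈ l := by
      have := List.getElem_mem hk
      simpa [show l[k] = q by simpa using hpk] using this
    have h0 : 0 ≤ PySem.Chars.find l [q] :=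
      (PySem.Chars.find_nonneg_iff l [q]).mpr ((List.singleton_infix_iff q l).mpr hq)
    obtain ⟨hpre, hminf⟩ := PySem.Chars.find_spec h0
    have hgetf : l[(PySem.Chars.find l [q]).toNat]? = some q := by
      rw [← List.head?_drop]; exact (prefix_singleton q _).mp hpre
    obtain ⟨hflt, hfeq⟩ := List.getElem?_eq_some_iff.mp hgetf
    have h1 : ¬ k < (PySem.Chars.find l [q]).toNat := by
      intro hlt
      exact hminf k hlt ((prefix_singleton q _).mpr
        (by rw [List.head?_drop]; exact List.getElem?_eq_some_iff.mpr ⟨hk, by simpa using hpk⟩))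
    have h2 : ¬ (PySem.Chars.find l [q]).toNat < k := by
      intro hlt
      exact hmin _ hlt (by simpa using hfeq)
    have : (PySem.Chars.find l [q]).toNat = k := by omega
    simp only []
    omega

-- ===== VERDICT (by name: the statement is the Claim_ definition above) =====
theorem get_string_constant_spec : Claim_equal_get_string_constant := by
  intro line s _hdom hpre
  unfold Spec_get_string_constant get_string_constant get_string_constant_alt
  have hpre' : (0:Int) ≤ s := hpre
  rw [getStrLoopA_eq_pvScan ((line.toList.length : Int) - s).toNat line.toList s [] 0 hpre' rfl]
  rw [pvScan_zero, PySem.Str.len_eq]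
  by_cases hge : s ≥ (line.toList.length : Int)
  · have hdrop : line.toList.drop s.toNat = [] := List.drop_eq_nil_of_le (by omega)
    have hlen : line.toList.length = line.length := String.length_toList ..
    simp [hdrop]
    intro h
    omega
  · have hslt : s < (line.toList.length : Int) := by omega
    have hs : ((s.toNat : ℕ) : Int) = s := by omega
    have hsub : ("\"" : String).toList = ['"'] := rfl
    have hstle : s.toNat ≤ line.toList.length := by omega
    have hL : line.toList.length = line.length := String.length_toList ..
    rw [if_neg hge, PySem.Str.findFrom_eq, hsub]
    have hf1 : PySem.Chars.findFrom line.toList ['"'] s =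
        if PySem.Chars.find (line.toList.drop s.toNat) ['"'] = -1 then -1
        else ((s.toNat : ℕ) : Int) + PySem.Chars.find (line.toList.drop s.toNat) ['"'] := by
      conv_lhs => rw [← hs]
      exact PySem.Chars.findFrom_natCast line.toList ['"'] s.toNat hstle
    rw [hf1, find_singleton]
    have hslice : PySem.Str.slice line (some s) none =
        String.ofList (line.toList.drop s.toNat) := by
      rw [← String.ofList_toList (s := PySem.Str.slice line (some s) none)]
      rw [PySem.Str.toList_slice, PySem.Chars.slice_eq_listSlice,
        PySem.List.slice_from line.toList hpre']
    have hlen : (line.toList.drop s.toNat).length = line.toList.length - s.toNat :=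
      List.length_drop
    cases h1 : (line.toList.drop s.toNat).findIdx? (· = '"') with
    | none =>
      simp [hslice, hlen]
      omega
    | some k =>
      simp only [h1]
      have hk : k < line.toList.length - s.toNat := by
        have := (List.findIdx?_eq_some_iff_getElem.mp h1).fst
        simpa using this
      rw [if_neg (show ¬ ((k : Int) = -1) by omega)]
      rw [if_pos (show ((s.toNat : ℕ) : Int) + (k : Int) ≠ -1 by omega)]
      rw [PySem.Str.findFrom_eq, hsub]
      have hdd : line.toList.drop (s.toNat + k + 1) =
          (line.toList.drop s.toNat).drop (k + 1) := by
        rw [List.drop_drop]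
        congr 1
      have hf2 : PySem.Chars.findFrom line.toList ['"'] (((s.toNat : ℕ) : Int) + (k : Int) + 1) =
          if PySem.Chars.find ((line.toList.drop s.toNat).drop (k + 1)) ['"'] = -1 then -1
          else (((s.toNat + k + 1 : ℕ)) : Int) +
            PySem.Chars.find ((line.toList.drop s.toNat).drop (k + 1)) ['"'] := by
        conv_lhs =>
          rw [show ((s.toNat : ℕ) : Int) + (k : Int) + 1 = (((s.toNat + k + 1 : ℕ)) : Int) by
            push_cast; ring]
        rw [← hdd]
        exact PySem.Chars.findFrom_natCast line.toList ['"'] (s.toNat + k + 1) (by omega)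
      rw [hf2, find_singleton]
      cases h2 : ((line.toList.drop s.toNat).drop (k + 1)).findIdx? (· = '"') with
      | none =>
        simp [hslice, hlen]
        omega
      | some m =>
        simp only [h2]
        rw [if_neg (show ¬ ((m : Int) = -1) by omega)]
        rw [if_pos (show ((s.toNat + k + 1 : ℕ) : Int) + (m : Int) ≠ -1 by omega)]
        have hslice2 : PySem.Str.slice line (some s)
              (some ((((s.toNat + k + 1 : ℕ)) : Int) + (m : Int) + 1)) =
            String.ofList ((line.toList.drop s.toNat).take (k + 1 + m + 1)) := by
          rw [← String.ofList_toList (s := PySem.Str.slice line _ _)]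
          rw [PySem.Str.toList_slice, PySem.Chars.slice_eq_listSlice]
          rw [show (((s.toNat + k + 1 : ℕ)) : Int) + (m : Int) + 1 =
              (((s.toNat + k + m + 2 : ℕ)) : Int) by push_cast; ring]
          conv_lhs => rw [← hs]
          rw [PySem.List.slice_natCast]
          congr 2
          omega
        rw [hslice2]
        simp only [Prod.mk.injEq, List.nil_append]
        exact ⟨trivial, by omega⟩
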